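-- pv_equiv track=rewrite | github.com/IgrMd/yandex-algos-training | Тренировки по алгоритмам 8.0/Тема 3, 4. Одномерное динамическое программирование. Двумерное динамическое программирование/F.py | gathering_coins
-- ===== SOURCE A (Python) =====
-- def gathering_coins(n: int, road: list[str]):
--     if n == 0:
--         return 0
--
--     reachable = [[False] * 3 for _ in range(n)]
--     for i in range(3):
--         reachable[0][i] = road[0][i] != 'W'
--
--     for i in range(n - 1):
--         for j in range(3):
--             if not reachable[i][j]:
--                 continue
--             reachable[i + 1][j] = road[i + 1][j] != 'W'
--             if j > 0:
--                 reachable[i + 1][j - 1] = road[i + 1][j - 1] != 'W'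
--             if j < 2:
--                 reachable[i + 1][j + 1] = road[i + 1][j + 1] != 'W'
--
--     dp = [[0] * 3 for _ in range(n)]
--     for i in range(3):
--         dp[0][i] = int(road[0][i] == 'C')
--
--     for i in range(1, n):
--         for j in range(3):
--             if not reachable[i][j]:
--                 continue
--             dp[i][j] = dp[i - 1][j]
--             if j > 0:
--                 dp[i][j] = max(dp[i][j], dp[i - 1][j - 1])
--             if j < 2:
--                 dp[i][j] = max(dp[i][j], dp[i - 1][j + 1])
--             dp[i][j] += int(road[i][j] == 'C')
--     return max(map(max, dp))
-- ===== SOURCE B (Python) =====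
-- def gathering_coins(n: int, road: list[str]):
--     # One fused single-pass DP: per-row cells are None when wall/unreachable,
--     # else best coin count; running best floored at 0.
--     if n == 0:
--         return 0
--     cur = [None if road[0][j] == 'W' else int(road[0][j] == 'C') for j in range(3)]
--     best = max([0] + [v for v in cur if v is not None])
--     for i in range(1, n):
--         nxt = []
--         for j in range(3):
--             if road[i][j] == 'W':
--                 nxt.append(None)
--                 continue
--             preds = [cur[k] for k in range(max(0, j - 1), min(2, j + 1) + 1)
--                      if cur[k] is not None]
--             nxt.append(max(preds) + int(road[i][j] == 'C') if preds else None)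
--         cur = nxt
--         best = max([best] + [v for v in cur if v is not None])
--     return best
-- ===== Notes on version B (the rewrite author's own statement) =====
-- stated objective: alternative
-- what changed: Replaces A's two separate n-by-3 table passes (boolean reachability table, then a value DP over the full table) with one fused single pass that keeps only the previous row as Option cells (None = wall/unreachable) and a running best, floored at 0. Pre_ excludes inputs where road rows beyond an all-wall cutoff are missing or shorter than 3: A skips reading them and returns, while B reads every row and raises IndexError.
-- outside the precondition, e.g. on gathering_coins(9, ['WWWC', 'CCWCW', 'WWCCWWW']): A returns 0, B raises IndexError
import Mathlib
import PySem

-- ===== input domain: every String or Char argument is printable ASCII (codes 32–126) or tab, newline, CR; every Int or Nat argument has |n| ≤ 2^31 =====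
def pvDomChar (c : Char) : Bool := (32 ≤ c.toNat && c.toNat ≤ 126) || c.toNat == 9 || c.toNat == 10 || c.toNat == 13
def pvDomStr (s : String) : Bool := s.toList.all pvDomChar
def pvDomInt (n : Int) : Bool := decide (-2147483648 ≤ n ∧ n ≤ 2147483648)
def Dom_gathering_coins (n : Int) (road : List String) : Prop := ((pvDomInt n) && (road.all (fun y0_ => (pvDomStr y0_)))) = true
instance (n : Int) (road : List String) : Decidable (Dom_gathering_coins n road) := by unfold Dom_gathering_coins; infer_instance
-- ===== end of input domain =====

-- B replaces A's two separate table passes (reachability, then value DP) by one fused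
-- single-pass DP over Option-valued rows; equal return values are proved on Pre_.

-- road[i][j] as a character; the 'W' default is only hit outside Pre_gathering_coins
def chrAt (road : List String) (i j : Int) : Char :=
  (PySem.List.pyGet? (((PySem.List.pyGet? road i).getD "").toList) j).getD 'W'

def notW (road : List String) (i j : Int) : Bool := chrAt road i j ≠ 'W'

def coin (road : List String) (i j : Int) : Int := if chrAt road i j = 'C' then 1 else 0

-- ===== PORT A =====
-- inner j-loop of A's reachability pass, unrolled j = 0,1,2 with sequential writes
def stepReachA (road : List String) (i : Int) (r : Bool × Bool × Bool) : Bool × Bool × Bool :=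
  let w0 := notW road i 0
  let w1 := notW road i 1
  let w2 := notW road i 2
  let n0 := false; let n1 := false; let n2 := false
  -- j = 0
  let n0 := if r.1 then w0 else n0
  let n1 := if r.1 then w1 else n1
  -- j = 1
  let n0 := if r.2.1 then w0 else n0
  let n1 := if r.2.1 then w1 else n1
  let n2 := if r.2.1 then w2 else n2
  -- j = 2
  let n1 := if r.2.2 then w1 else n1
  let n2 := if r.2.2 then w2 else n2
  (n0, n1, n2)

def reachRowsA (road : List String) : Nat → (Bool × Bool × Bool) → Int → List (Bool × Bool × Bool)
  | 0, cur, _ => [cur]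
  | k + 1, cur, i => cur :: reachRowsA road k (stepReachA road (i + 1) cur) (i + 1)

-- inner j-loop of A's dp pass, unrolled (r is reachable[i], d is dp[i-1])
def stepDpA (road : List String) (i : Int) (r : Bool × Bool × Bool) (d : Int × Int × Int) : Int × Int × Int :=
  (if r.1 then max d.1 d.2.1 + coin road i 0 else 0,
   if r.2.1 then max (max d.2.1 d.1) d.2.2 + coin road i 1 else 0,
   if r.2.2 then max d.2.2 d.2.1 + coin road i 2 else 0)

def dpRowsA (road : List String) : List (Bool × Bool × Bool) → Int → (Int × Int × Int) → List (Int × Int × Int)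
  | [], _, cur => [cur]
  | r :: rs, i, cur => cur :: dpRowsA road rs (i + 1) (stepDpA road (i + 1) r cur)

def rowMax (d : Int × Int × Int) : Int := max (max d.1 d.2.1) d.2.2

def gathering_coins (n : Int) (road : List String) : Int :=
  if n = 0 then 0
  else
    let r0 := (notW road 0 0, notW road 0 1, notW road 0 2)
    let reach := reachRowsA road (n - 1).toNat r0 0
    let d0 := (coin road 0 0, coin road 0 1, coin road 0 2)
    let dps := dpRowsA road reach.tail 0 d0
    match dps with
    | [] => 0
    | x :: xs => List.foldl max (rowMax x) (List.map rowMax xs)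

-- ===== PORT B =====
-- max of the non-None predecessors (Python's `max(preds) if preds else None`)
def bp2 (a b : Option Int) : Option Int :=
  match a, b with
  | none, none => none
  | some x, none => some x
  | none, some y => some y
  | some x, some y => some (max x y)

def stepB (road : List String) (i : Int) (c : Option Int × Option Int × Option Int) :
    Option Int × Option Int × Option Int :=
  (if chrAt road i 0 = 'W' then none else (bp2 c.1 c.2.1).map (· + coin road i 0),
   if chrAt road i 1 = 'W' then none else (bp2 (bp2 c.1 c.2.1) c.2.2).map (· + coin road i 1),
   if chrAt road i 2 = 'W' then none else (bp2 c.2.1 c.2.2).map (· + coin road i 2))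

def updB (b : Int) (o : Option Int) : Int :=
  match o with
  | none => b
  | some v => max b v

def bestRow (b : Int) (c : Option Int × Option Int × Option Int) : Int :=
  updB (updB (updB b c.1) c.2.1) c.2.2

def loopB (road : List String) : Nat → Int → (Option Int × Option Int × Option Int) → Int → Int
  | 0, _, _, best => best
  | k + 1, i, cur, best =>
    let nxt := stepB road (i + 1) cur
    loopB road k (i + 1) nxt (bestRow best nxt)

def cellInit (road : List String) (j : Int) : Option Int :=
  if chrAt road 0 j = 'W' then none else some (coin road 0 j)

def gathering_coins_alt (n : Int) (road : List String) : Int :=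
  if n = 0 then 0
  else
    let c0 := (cellInit road 0, cellInit road 1, cellInit road 2)
    loopB road (n - 1).toNat 0 c0 (bestRow 0 c0)

-- ===== PRECONDITION & SPEC =====
-- Pre_ excludes the inputs on which Python A raises (negative n, fewer than n rows, a
-- used row shorter than 3) and the malformed inputs where A avoids the IndexError only
-- because an all-wall row cuts reachability before the missing/short rows are read,
-- while B (which reads every one of the n rows) raises there.
def Pre_gathering_coins (n : Int) (road : List String) : Prop :=
  0 ≤ n ∧ n ≤ road.length ∧ ∀ s ∈ road.take n.toNat, 3 ≤ s.toList.length
instance (n : Int) (road : List String) : Decidable (Pre_gathering_coins n road) := by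
  unfold Pre_gathering_coins; infer_instance

def pvWitness_gathering_coins : Int × List String := (3, ["..C", ".W.", "C.C"])

def Spec_gathering_coins (n : Int) (road : List String) (out : Int) : Prop := out = gathering_coins_alt n road
instance (n : Int) (road : List String) (out : Int) : Decidable (Spec_gathering_coins n road out) := by unfold Spec_gathering_coins; infer_instance

-- ===== CLAIM (what is proved, stated in full; the proofs are below) =====
def Claim_equal_gathering_coins : Prop := ∀ (n : Int) (road : List String), Dom_gathering_coins n road → Pre_gathering_coins n road → Spec_gathering_coins n road (gathering_coins n road)

-- ===== LEMMAS AND PROOFS =====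

theorem reachRowsA_cons (road : List String) (k : Nat) (r : Bool × Bool × Bool) (i : Int) :
    reachRowsA road k r i = r :: (reachRowsA road k r i).tail := by
  cases k <;> simp [reachRowsA]

theorem dpRowsA_cons (road : List String) (l : List (Bool × Bool × Bool)) (i : Int)
    (d : Int × Int × Int) : dpRowsA road l i d = d :: (dpRowsA road l i d).tail := by
  cases l <;> simp [dpRowsA]

-- invariant tying A's (reachable, dp) row to B's Option-valued row
def Link (r : Bool × Bool × Bool) (d : Int × Int × Int)
    (c : Option Int × Option Int × Option Int) : Prop :=
  c.1 = (if r.1 then some d.1 else none) ∧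
  c.2.1 = (if r.2.1 then some d.2.1 else none) ∧
  c.2.2 = (if r.2.2 then some d.2.2 else none) ∧
  0 ≤ d.1 ∧ 0 ≤ d.2.1 ∧ 0 ≤ d.2.2 ∧
  (r.1 = false → d.1 = 0) ∧ (r.2.1 = false → d.2.1 = 0) ∧ (r.2.2 = false → d.2.2 = 0)

theorem coin_nonneg (road : List String) (i j : Int) : 0 ≤ coin road i j := by
  unfold coin; split <;> omega

theorem coin_W (road : List String) (i j : Int) (h : chrAt road i j = 'W') :
    coin road i j = 0 := by
  unfold coin; rw [h]; decide

set_option maxHeartbeats 3200000 in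
theorem link_step (road : List String) (i : Int) (r : Bool × Bool × Bool)
    (d : Int × Int × Int) (c : Option Int × Option Int × Option Int) (h : Link r d c) :
    Link (stepReachA road i r) (stepDpA road i (stepReachA road i r) d) (stepB road i c) := by
  obtain ⟨r0, r1, r2⟩ := r
  obtain ⟨d0, d1, d2⟩ := d
  obtain ⟨c0, c1, c2⟩ := c
  obtain ⟨h0, h1, h2, g0, g1, g2, z0, z1, z2⟩ := h
  simp only at h0 h1 h2 z0 z1 z2 g0 g1 g2
  subst h0 h1 h2
  have q0 := coin_nonneg road i 0
  have q1 := coin_nonneg road i 1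
  have q2 := coin_nonneg road i 2
  by_cases hW0 : chrAt road i 0 = 'W' <;> by_cases hW1 : chrAt road i 1 = 'W' <;>
    by_cases hW2 : chrAt road i 2 = 'W' <;> cases r0 <;> cases r1 <;> cases r2 <;>
    simp_all [stepReachA, stepDpA, stepB, Link, notW, bp2] <;>
    omega

theorem bestRow_link (r : Bool × Bool × Bool) (d : Int × Int × Int)
    (c : Option Int × Option Int × Option Int) (h : Link r d c) (b : Int) (hb : 0 ≤ b) :
    bestRow b c = max b (rowMax d) := by
  obtain ⟨r0, r1, r2⟩ := r
  obtain ⟨d0, d1, d2⟩ := d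
  obtain ⟨c0, c1, c2⟩ := c
  obtain ⟨h0, h1, h2, g0, g1, g2, z0, z1, z2⟩ := h
  simp only at h0 h1 h2 z0 z1 z2 g0 g1 g2
  subst h0 h1 h2
  cases r0 <;> cases r1 <;> cases r2 <;> simp_all [bestRow, updB, rowMax]

theorem main_loop (road : List String) (k : Nat) : ∀ (i : Int) (r : Bool × Bool × Bool)
    (d : Int × Int × Int) (c : Option Int × Option Int × Option Int) (b : Int),
    0 ≤ b → Link r d c →
    loopB road k i c b =
      List.foldl max b (List.map rowMax
        (List.tail (dpRowsA road (List.tail (reachRowsA road k r i)) i d))) := by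
  induction k with
  | zero =>
    intro i r d c b hb h
    simp [loopB, reachRowsA, dpRowsA]
  | succ k ih =>
    intro i r d c b hb h
    have hs := link_step road (i + 1) r d c h
    have hbr := bestRow_link _ _ _ hs b hb
    have hb2 : 0 ≤ bestRow b (stepB road (i + 1) c) := by
      rw [hbr]; exact le_trans hb (le_max_left _ _)
    have hih := ih (i + 1) (stepReachA road (i + 1) r)
      (stepDpA road (i + 1) (stepReachA road (i + 1) r) d) (stepB road (i + 1) c)
      (bestRow b (stepB road (i + 1) c)) hb2 hs
    simp only [loopB]
    rw [hih, hbr]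
    simp only [reachRowsA, List.tail_cons]
    conv_rhs => rw [reachRowsA_cons road k (stepReachA road (i + 1) r) (i + 1)]
    simp only [dpRowsA, List.tail_cons]
    rw [dpRowsA_cons road (List.tail (reachRowsA road k (stepReachA road (i + 1) r) (i + 1)))]
    simp [List.foldl_cons]

-- ===== VERDICT (by name: the statement is the Claim_ definition above) =====
theorem link_init (road : List String) :
    Link (notW road 0 0, notW road 0 1, notW road 0 2)
      (coin road 0 0, coin road 0 1, coin road 0 2)
      (cellInit road 0, cellInit road 1, cellInit road 2) := by
  have q0 := coin_nonneg road 0 0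
  have q1 := coin_nonneg road 0 1
  have q2 := coin_nonneg road 0 2
  by_cases hW0 : chrAt road 0 0 = 'W' <;> by_cases hW1 : chrAt road 0 1 = 'W' <;>
    by_cases hW2 : chrAt road 0 2 = 'W' <;>
    simp_all [Link, notW, cellInit, coin_W]

theorem gathering_coins_spec : Claim_equal_gathering_coins := by
  intro n road _ _
  unfold Spec_gathering_coins gathering_coins gathering_coins_alt
  by_cases hn : n = 0
  · simp [hn]
  · simp only [hn, if_false]
    have hL := link_init road
    have hd0 : 0 ≤ rowMax (coin road 0 0, coin road 0 1, coin road 0 2) :=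
      le_trans (coin_nonneg road 0 0) (le_trans (le_max_left _ _) (le_max_left _ _))
    have hbr := bestRow_link _ _ _ hL 0 le_rfl
    have hml := main_loop road (n - 1).toNat 0
      (notW road 0 0, notW road 0 1, notW road 0 2)
      (coin road 0 0, coin road 0 1, coin road 0 2)
      (cellInit road 0, cellInit road 1, cellInit road 2)
      (bestRow 0 (cellInit road 0, cellInit road 1, cellInit road 2))
      (by rw [hbr]; exact le_trans le_rfl (le_max_left _ _)) hL
    rw [hml, hbr, max_eq_right hd0]
    rw [dpRowsA_cons road (List.tail (reachRowsA road (n - 1).toNat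
      (notW road 0 0, notW road 0 1, notW road 0 2) 0))]
    simp
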